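-- pv_equiv track=rewrite | github.com/winwinklao/carParking | admin/admin.py | tranferPark
-- ===== SOURCE A (Python) =====
-- def tranferPark(T):
--     T=str(T)
--     Stext=len(T)
--     space=(74-Stext)
--     t=T
--     for p in range(space):
--         if(p%2==0):
--             t=" "+t
--         else:
--             t= t+" "
--     return t
-- ===== SOURCE B (Python) =====
-- def tranferPark(T):
--     T = str(T)
--     space = 74 - len(T)
--     return " " * ((space + 1) // 2) + T + " " * (space // 2)
-- ===== Notes on version B (the rewrite author's own statement) =====
-- stated objective: simpler
-- what changed: Replaced the alternating prepend/append padding loop with a closed-form split: ceil(space/2) leading spaces and floor(space/2) trailing spaces computed directly.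
import Mathlib
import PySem

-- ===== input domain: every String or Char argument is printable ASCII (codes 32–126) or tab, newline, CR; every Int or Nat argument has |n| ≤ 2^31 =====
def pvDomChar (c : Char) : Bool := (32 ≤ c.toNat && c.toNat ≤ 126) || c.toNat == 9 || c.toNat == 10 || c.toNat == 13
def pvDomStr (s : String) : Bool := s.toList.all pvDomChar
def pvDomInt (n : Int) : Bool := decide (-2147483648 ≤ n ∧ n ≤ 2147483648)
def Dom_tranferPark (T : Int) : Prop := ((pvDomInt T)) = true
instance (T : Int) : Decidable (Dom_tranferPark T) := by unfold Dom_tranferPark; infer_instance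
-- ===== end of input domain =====

-- B replaces A's alternating prepend/append loop with a closed-form split of the padding
-- into ceil(space/2) leading and floor(space/2) trailing spaces (simpler, no loop).


-- ===== PORT A =====
def tranferPark (T : Int) : String :=
  let Ts : List Char := PySem.Int.toChars T
  let Stext : Int := (Ts.length : Int)
  let space : Int := 74 - Stext
  String.ofList ((PySem.List.pyRange 0 space 1).foldl
    (fun t p => if PySem.Int.mod p 2 == 0 then ' ' :: t else t ++ [' ']) Ts)

-- ===== PORT B =====
def tranferPark_alt (T : Int) : String :=
  let Ts : List Char := PySem.Int.toChars T
  let space : Int := 74 - (Ts.length : Int)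
  String.ofList (PySem.List.pyRepeat [' '] (PySem.Int.floordiv (space + 1) 2) ++ Ts
    ++ PySem.List.pyRepeat [' '] (PySem.Int.floordiv space 2))

-- ===== PRECONDITION & SPEC =====
def Spec_tranferPark (T : Int) (out : String) : Prop := out = tranferPark_alt T
instance (T : Int) (out : String) : Decidable (Spec_tranferPark T out) := by unfold Spec_tranferPark; infer_instance

-- ===== CLAIM (what is proved, stated in full; the proofs are below) =====
def Claim_equal_tranferPark : Prop := ∀ (T : Int), Dom_tranferPark T → Spec_tranferPark T (tranferPark T)

-- ===== LEMMAS AND PROOFS =====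

-- the loop over range(n) yields ceil(n/2) leading and floor(n/2) trailing spaces
theorem tranferPark_loop (s : List Char) (n : Nat) :
    (PySem.List.pyRange 0 (n : Int) 1).foldl
      (fun t p => if PySem.Int.mod p 2 == 0 then ' ' :: t else t ++ [' ']) s
    = List.replicate ((n + 1) / 2) ' ' ++ s ++ List.replicate (n / 2) ' ' := by
  induction n with
  | zero => simp [PySem.List.pyRange_one_eq_nil]
  | succ m ih =>
      rw [show ((m + 1 : Nat) : Int) = (m : Int) + 1 by push_cast; ring,
        PySem.List.pyRange_one_succ_right (show (0:Int) ≤ (m:Int) by omega),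
        List.foldl_append, ih]
      simp only [List.foldl_cons, List.foldl_nil]
      rcases Nat.even_or_odd m with ⟨k, hk⟩ | ⟨k, hk⟩
      · have : PySem.Int.mod (m : Int) 2 = 0 := by
          rw [PySem.Int.mod_eq_emod_of_pos (by norm_num)]; omega
        simp only [this]
        subst hk
        simp [List.replicate_succ, show (k + k + 1 + 1) / 2 = k + 1 by omega,
          show (k + k + 1) / 2 = k by omega, show (k + k) / 2 = k by omega]
      · have : PySem.Int.mod (m : Int) 2 = 1 := by
          rw [PySem.Int.mod_eq_emod_of_pos (by norm_num)]; omega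
        simp only [this]
        subst hk
        simp [show (2 * k + 1 + 1 + 1) / 2 = k + 1 by omega,
          show (2 * k + 1 + 1) / 2 = k + 1 by omega,
          show (2 * k + 1) / 2 = k by omega, List.replicate_succ',
          List.append_assoc]

-- ===== VERDICT (by name: the statement is the Claim_ definition above) =====
theorem tranferPark_spec : Claim_equal_tranferPark := by
  intro T _
  unfold Spec_tranferPark tranferPark tranferPark_alt
  simp only []
  set Ts := PySem.Int.toChars T with hTs
  set space : Int := 74 - (Ts.length : Int) with hspace
  by_cases hs : 0 ≤ space
  · obtain ⟨n, hn⟩ : ∃ n : Nat, space = (n : Int) := ⟨space.toNat, (Int.toNat_of_nonneg hs).symm⟩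
    rw [hn, tranferPark_loop, PySem.List.pyRepeat_singleton, PySem.List.pyRepeat_singleton,
      show (PySem.Int.floordiv ((n : Int) + 1) 2).toNat = (n + 1) / 2 from by
        rw [PySem.Int.floordiv_eq_ediv_of_pos (by norm_num)]; omega,
      show (PySem.Int.floordiv ((n : Int)) 2).toNat = n / 2 from by
        rw [PySem.Int.floordiv_eq_ediv_of_pos (by norm_num)]; omega]
  · rw [PySem.List.pyRange_one_eq_nil (by omega), List.foldl_nil,
      PySem.List.pyRepeat_singleton, PySem.List.pyRepeat_singleton,
      show (PySem.Int.floordiv (space + 1) 2).toNat = 0 by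
        rw [PySem.Int.floordiv_eq_ediv_of_pos (by norm_num)]; omega,
      show (PySem.Int.floordiv space 2).toNat = 0 by
        rw [PySem.Int.floordiv_eq_ediv_of_pos (by norm_num)]; omega]
    simp
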